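-- pv_equiv track=rewrite | github.com/timointhebush/AlgorithmStudy | PROGRAMMERS/백준_괄호추가하기.py | get_brack_cases_formula
-- ===== SOURCE A (Python) =====
-- from itertools import combinations
--
-- def get_brack_cases_formula(formula, n_op, n_brack_pair):
--     brack_op_cand_idxes = []
--     for n_brack_pair_cand in range(1, n_brack_pair + 1):
--         tmp = combinations(range(n_op), n_brack_pair_cand)
--         brack_op_cand_idxes += list(tmp)
--     del_continue_brack_idx_case(brack_op_cand_idxes)
--     formula_cand = []
--     for idx_case in brack_op_cand_idxes:
--         formula_cand.append(make_idx_brack_formula(formula, idx_case))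
--     return formula_cand
--
-- def del_continue_brack_idx_case(brack_op_cand_idxes):
--     del_idx_list = []
--     for i_case, idxes_case in enumerate(brack_op_cand_idxes):
--         n = len(idxes_case)
--         for i in range(n - 1):
--             j = i + 1
--             if idxes_case[j] == idxes_case[i] + 1:
--                 del_idx_list.append(i_case)
--                 break
--     if len(del_idx_list) >= 1:
--         for i in del_idx_list[::-1]:
--             del brack_op_cand_idxes[i]
--
-- def make_idx_brack_formula(formula, idx_case):
--     formula = list(formula)
--     for i in list(idx_case)[::-1]:
--         formula.insert(i * 2 + 3, ")")
--         formula.insert(i * 2, "(")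
--     return "".join(formula)
-- ===== SOURCE B (Python) =====
-- def get_brack_cases_formula(formula, n_op, n_brack_pair):
--     result = []
--     for k in range(1, n_brack_pair + 1):
--         for idxs in _nonconsec(0, n_op, k):
--             result.append(_bracketed(formula, idxs))
--     return result
--
-- def _nonconsec(lo, n, k):
--     # all strictly increasing k-tuples from [lo, n) with no two consecutive, lex order
--     if k == 0:
--         return [()]
--     return [(i,) + rest for i in range(lo, n) for rest in _nonconsec(i + 2, n, k - 1)]
--
-- def _bracketed(s, idxs):
--     for i in reversed(idxs):
--         s = s[:2 * i + 3] + ")" + s[2 * i + 3:]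
--         s = s[:2 * i] + "(" + s[2 * i:]
--     return s
-- ===== Notes on version B (the rewrite author's own statement) =====
-- stated objective: alternative
-- what changed: B enumerates the non-consecutive operator-index subsets directly by recursion (skipping consecutive picks at generation time) and builds each bracketed formula by string slicing, instead of A's generate-all-combinations, collect-bad-indices, delete-by-index-in-reverse pass over a Python list.
import Mathlib
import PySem

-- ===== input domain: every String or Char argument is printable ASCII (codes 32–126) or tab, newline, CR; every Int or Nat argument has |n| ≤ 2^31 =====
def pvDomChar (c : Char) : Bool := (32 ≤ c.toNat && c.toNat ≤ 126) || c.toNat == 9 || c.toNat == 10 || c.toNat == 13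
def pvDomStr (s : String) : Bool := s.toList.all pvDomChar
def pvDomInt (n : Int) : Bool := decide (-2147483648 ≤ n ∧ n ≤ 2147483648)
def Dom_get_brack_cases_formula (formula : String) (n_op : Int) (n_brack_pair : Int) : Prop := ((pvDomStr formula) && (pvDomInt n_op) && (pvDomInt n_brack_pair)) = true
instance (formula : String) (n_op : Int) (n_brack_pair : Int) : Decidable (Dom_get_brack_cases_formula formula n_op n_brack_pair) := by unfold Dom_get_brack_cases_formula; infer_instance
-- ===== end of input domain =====

-- B enumerates the non-consecutive index subsets directly (and splices brackets with string
-- slicing) instead of A's generate-all-then-delete-by-index pass; objective: alternative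
-- (the running time of both is dominated by the size of the output).

-- ===== PORT A =====
-- inner loop of del_continue_brack_idx_case: scan for an adjacent pair idxes[i+1] == idxes[i]+1 (break on first hit)
def hasConsecA : List Int → Bool
  | a :: b :: rest => if b == a + 1 then true else hasConsecA (b :: rest)
  | _ => false

-- del_continue_brack_idx_case: collect flagged positions via enumerate, then delete them in reverse
-- (the Python 'if len(del_idx_list) >= 1' guard is a no-op: the fold over an empty list does nothing)
def delContinueBrackIdxCase (l : List (List Int)) : List (List Int) :=
  let delIdxList := ((PySem.List.enumerate l 0).filter (fun p => hasConsecA p.2)).map (·.1)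
  delIdxList.reverse.foldl (fun acc i => acc.eraseIdx i.toNat) l

def makeIdxBrackFormula (formula : String) (idx_case : List Int) : String :=
  String.ofList ((idx_case.reverse).foldl
    (fun fl i => PySem.List.insert (PySem.List.insert fl (i*2+3) ')') (i*2) '(') formula.toList)

def get_brack_cases_formula (formula : String) (n_op : Int) (n_brack_pair : Int) : List String :=
  let brackOpCandIdxes := (PySem.List.pyRange 1 (n_brack_pair+1) 1).foldl
    (fun acc k => acc ++ PySem.List.combinations (PySem.List.pyRange 0 n_op 1) k.toNat) []
  let brackOpCandIdxes := delContinueBrackIdxCase brackOpCandIdxes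
  brackOpCandIdxes.foldl (fun acc c => acc ++ [makeIdxBrackFormula formula c]) []

-- ===== PORT B =====
-- _nonconsec(lo, n, k): strictly increasing k-tuples from [lo, n) with no two consecutive, lex order
def nonconsecB (lo n : Int) (k : Nat) : List (List Int) :=
  match k with
  | 0 => [[]]
  | Nat.succ k' => (PySem.List.pyRange lo n 1).flatMap (fun i => (nonconsecB (i+2) n k').map (i :: ·))
termination_by k

-- _bracketed: splice ")" then "(" into the string by slicing, for each index right-to-left
def bracketedB (s : String) (idxs : List Int) : String :=
  idxs.reverse.foldl (fun s i =>
    let s1 := String.ofList (PySem.List.slice s.toList none (some (2*i+3)) ++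
                ')' :: PySem.List.slice s.toList (some (2*i+3)) none)
    String.ofList (PySem.List.slice s1.toList none (some (2*i)) ++
                '(' :: PySem.List.slice s1.toList (some (2*i)) none)) s

def get_brack_cases_formula_alt (formula : String) (n_op : Int) (n_brack_pair : Int) : List String :=
  (PySem.List.pyRange 1 (n_brack_pair+1) 1).foldl
    (fun acc k => (nonconsecB 0 n_op k.toNat).foldl
      (fun acc2 idxs => acc2 ++ [bracketedB formula idxs]) acc) []

-- ===== PRECONDITION & SPEC =====
def Spec_get_brack_cases_formula (formula : String) (n_op : Int) (n_brack_pair : Int) (out : List String) : Prop := out = get_brack_cases_formula_alt formula n_op n_brack_pair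
instance (formula : String) (n_op : Int) (n_brack_pair : Int) (out : List String) : Decidable (Spec_get_brack_cases_formula formula n_op n_brack_pair out) := by unfold Spec_get_brack_cases_formula; infer_instance

-- ===== CLAIM (what is proved, stated in full; the proofs are below) =====
def Claim_equal_get_brack_cases_formula : Prop := ∀ (formula : String) (n_op : Int) (n_brack_pair : Int), Dom_get_brack_cases_formula formula n_op n_brack_pair → Spec_get_brack_cases_formula formula n_op n_brack_pair (get_brack_cases_formula formula n_op n_brack_pair)

-- ===== LEMMAS AND PROOFS =====

theorem nonconsecB_succ (lo n : Int) (k : Nat) :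
    nonconsecB lo n (k+1)
    = (PySem.List.pyRange lo n 1).flatMap (fun i => (nonconsecB (i+2) n k).map (i :: ·)) := by
  rw [nonconsecB.eq_def]

-- Python list.insert at a nonnegative (possibly past-the-end, clamping) position
theorem insert_nonneg {α : Type} (l : List α) (i : Int) (h : 0 ≤ i) (v : α) :
    PySem.List.insert l i v = l.take i.toNat ++ v :: l.drop i.toNat := by
  simp only [PySem.List.insert, PySem.List.sliceIndices]
  have e : (if i < 0 then max (i + (l.length:Int)) (if (1:Int) < 0 then -1 else 0)
      else min i (if (1:Int) < 0 then (l.length:Int) - 1 else l.length)).toNat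
      = min i.toNat l.length := by
    split <;> simp <;> omega
  rw [e]
  rcases Nat.le_total i.toNat l.length with hle | hle
  · rw [min_eq_left hle]
  · rw [min_eq_right hle, List.take_of_length_le hle,
      List.take_length, List.drop_of_length_le hle, List.drop_length]

-- B's per-index splice step equals A's per-index double insert
theorem step_eq (l : List Char) (i : Int) (h : 0 ≤ i) :
    (let s1 := String.ofList (PySem.List.slice l none (some (2*i+3)) ++
                ')' :: PySem.List.slice l (some (2*i+3)) none)
     String.ofList (PySem.List.slice s1.toList none (some (2*i)) ++
                '(' :: PySem.List.slice s1.toList (some (2*i)) none))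
    = String.ofList (PySem.List.insert (PySem.List.insert l (i*2+3) ')') (i*2) '(') := by
  rw [insert_nonneg _ (i*2) (by omega) '(', insert_nonneg _ (i*2+3) (by omega) ')',
    show i*2+3 = 2*i+3 from by ring, show i*2 = 2*i from by ring,
    PySem.List.slice_to _ (show (0:Int) ≤ 2*i+3 by omega),
    PySem.List.slice_from _ (show (0:Int) ≤ 2*i+3 by omega)]
  simp only [String.toList_ofList,
    PySem.List.slice_to _ (show (0:Int) ≤ 2*i by omega),
    PySem.List.slice_from _ (show (0:Int) ≤ 2*i by omega)]

-- folding B's splice step over a list of nonnegative indices = folding A's insert step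
theorem fold_step_eq (d : List Int) (hd : ∀ x ∈ d, 0 ≤ x) (s : String) :
    d.foldl (fun s i =>
      let s1 := String.ofList (PySem.List.slice s.toList none (some (2*i+3)) ++
                  ')' :: PySem.List.slice s.toList (some (2*i+3)) none)
      String.ofList (PySem.List.slice s1.toList none (some (2*i)) ++
                  '(' :: PySem.List.slice s1.toList (some (2*i)) none)) s
    = String.ofList (d.foldl
        (fun fl i => PySem.List.insert (PySem.List.insert fl (i*2+3) ')') (i*2) '(') s.toList) := by
  induction d generalizing s with
  | nil => simp
  | cons a t ih =>
    simp only [List.foldl_cons]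
    rw [step_eq s.toList a (hd a (by simp))]
    rw [ih (fun x hx => hd x (by simp [hx]))]
    simp

theorem bracketed_eq_make (f : String) (c : List Int) (hc : ∀ x ∈ c, 0 ≤ x) :
    bracketedB f c = makeIdxBrackFormula f c := by
  unfold bracketedB makeIdxBrackFormula
  exact fold_step_eq c.reverse (fun x hx => hc x (List.mem_reverse.mp hx)) f

-- deleting the flagged positions back-to-front is filtering
theorem del_aux : ∀ (l pre : List (List Int)),
    ((((PySem.List.enumerate l (pre.length : Int)).filter (fun p => hasConsecA p.2)).map (·.1)).reverse).foldl
        (fun acc i => acc.eraseIdx i.toNat) (pre ++ l)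
    = pre ++ l.filter (fun c => !hasConsecA c) := by
  intro l
  induction l with
  | nil => intro pre; simp [PySem.List.enumerate_nil]
  | cons x xs ih =>
    intro pre
    rw [PySem.List.enumerate_cons]
    have hlen : (pre.length : Int) + 1 = ((pre ++ [x]).length : Int) := by simp
    by_cases hx : hasConsecA x
    · simp only [List.filter_cons, hx, if_pos, List.map_cons, List.reverse_cons, List.foldl_append]
      rw [hlen]
      have hmid : pre ++ x :: xs = (pre ++ [x]) ++ xs := by simp
      rw [hmid, ih (pre ++ [x])]
      simp only [List.foldl_cons, List.foldl_nil, List.append_assoc, List.singleton_append,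
        Int.toNat_natCast]
      rw [List.eraseIdx_append_of_length_le (le_refl pre.length)]
      simp
    · simp only [List.filter_cons, hx]
      simp only [Bool.false_eq_true, if_false]
      rw [hlen]
      have hmid : pre ++ x :: xs = (pre ++ [x]) ++ xs := by simp
      rw [hmid, ih (pre ++ [x])]
      simp

theorem del_eq_filter (l : List (List Int)) :
    delContinueBrackIdxCase l = l.filter (fun c => !hasConsecA c) := by
  have := del_aux l []
  simpa [delContinueBrackIdxCase] using this

-- members of nonconsecB lo n k are lists of elements ≥ lo
theorem mem_nonconsecB : ∀ (k : Nat) (lo n : Int) (c : List Int),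
    c ∈ nonconsecB lo n k → ∀ x ∈ c, lo ≤ x := by
  intro k
  induction k with
  | zero => intro lo n c hc x hx; simp [nonconsecB] at hc; subst hc; simp at hx
  | succ k' ih =>
    intro lo n c hc x hx
    rw [nonconsecB] at hc
    simp only [List.mem_flatMap, List.mem_map] at hc
    obtain ⟨i, hi, rest, hrest, hcons⟩ := hc
    subst hcons
    have hlo : lo ≤ i := (PySem.List.mem_pyRange_one.mp hi).1
    rcases List.mem_cons.mp hx with rfl | hxr
    · exact hlo
    · have := ih (i+2) n rest hrest x hxr
      omega

-- the filtered combinations are exactly the directly-enumerated non-consecutive tuples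
theorem filt_comb (n lo : Int) (k : Nat) :
    (PySem.List.combinations (PySem.List.pyRange lo n 1) k).filter (fun c => !hasConsecA c)
    = nonconsecB lo n k := by
  by_cases h : lo < n
  · match k with
    | 0 => simp [PySem.List.combinations_zero, nonconsecB, hasConsecA]
    | Nat.succ k' =>
      rw [PySem.List.pyRange_one_cons h, PySem.List.combinations_cons_succ, List.filter_append,
        List.filter_map]
      have h2 : (PySem.List.combinations (PySem.List.pyRange (lo+1) n 1) k').filter
          ((fun c => !hasConsecA c) ∘ (fun c => lo :: c)) = nonconsecB (lo+2) n k' := by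
        by_cases h1 : lo + 1 < n
        · match k' with
          | 0 => simp [PySem.List.combinations_zero, nonconsecB, hasConsecA]
          | Nat.succ k'' =>
            rw [PySem.List.pyRange_one_cons h1, show lo+1+1 = lo+2 from by ring,
              PySem.List.combinations_cons_succ, List.filter_append]
            have hA : ((PySem.List.combinations (PySem.List.pyRange (lo+2) n 1) k'').map
                (fun c => (lo+1) :: c)).filter ((fun c => !hasConsecA c) ∘ (fun c => lo :: c)) = [] := by
              apply List.filter_eq_nil_iff.mpr
              intro a ha
              obtain ⟨c, _, rfl⟩ := List.mem_map.mp ha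
              simp [hasConsecA]
            have hB : (PySem.List.combinations (PySem.List.pyRange (lo+2) n 1) (k''+1)).filter
                ((fun c => !hasConsecA c) ∘ (fun c => lo :: c))
                = nonconsecB (lo+2) n (k''+1) := by
              rw [List.filter_congr (q := fun c => !hasConsecA c) ?_]
              · exact filt_comb n (lo+2) (k''+1)
              · intro c hc
                have hsub := PySem.List.sublist_of_mem_combinations hc
                cases c with
                | nil => simp [hasConsecA]
                | cons a t =>
                  have ha : a ∈ PySem.List.pyRange (lo+2) n 1 :=
                    hsub.subset (List.mem_cons_self)
                  have : lo + 2 ≤ a := (PySem.List.mem_pyRange_one.mp ha).1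
                  have hne : (a == lo + 1) = false := by rw [beq_eq_false_iff_ne]; omega
                  simp only [Function.comp_apply]
                  conv_lhs => rw [hasConsecA]
                  rw [hne]
                  simp
            rw [hA, hB, List.nil_append]
        · have e1 : PySem.List.pyRange (lo+1) n 1 = [] :=
            PySem.List.pyRange_one_eq_nil (by omega)
          have e2 : PySem.List.pyRange (lo+2) n 1 = [] :=
            PySem.List.pyRange_one_eq_nil (by omega)
          match k' with
          | 0 => simp [e1, PySem.List.combinations_zero, nonconsecB, hasConsecA]
          | Nat.succ k'' => simp [e1, e2, PySem.List.combinations_nil_succ, nonconsecB]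
      rw [h2, filt_comb n (lo+1) (Nat.succ k')]
      conv_rhs => rw [nonconsecB_succ, PySem.List.pyRange_one_cons h, List.flatMap_cons]
      congr 1
      conv_rhs => rw [← nonconsecB_succ]
  · have e : PySem.List.pyRange lo n 1 = [] := PySem.List.pyRange_one_eq_nil (by omega)
    match k with
    | 0 => simp [e, PySem.List.combinations_zero, nonconsecB, hasConsecA]
    | Nat.succ k' => simp [e, PySem.List.combinations_nil_succ, nonconsecB]
termination_by (n - lo).toNat
decreasing_by all_goals omega

-- ===== VERDICT (by name: the statement is the Claim_ definition above) =====
theorem get_brack_cases_formula_spec : Claim_equal_get_brack_cases_formula := by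
  intro formula n_op n_brack_pair _
  show get_brack_cases_formula formula n_op n_brack_pair
      = get_brack_cases_formula_alt formula n_op n_brack_pair
  unfold get_brack_cases_formula get_brack_cases_formula_alt
  rw [PySem.List.foldl_append_singleton_eq_map, List.nil_append, ← List.flatMap_eq_foldl,
    del_eq_filter, List.filter_flatMap, List.map_flatMap]
  calc (PySem.List.pyRange 1 (n_brack_pair+1) 1).flatMap
        (fun k => ((PySem.List.combinations (PySem.List.pyRange 0 n_op 1) k.toNat).filter
          (fun c => !hasConsecA c)).map (makeIdxBrackFormula formula))
      = (PySem.List.pyRange 1 (n_brack_pair+1) 1).flatMap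
        (fun k => (nonconsecB 0 n_op k.toNat).map (bracketedB formula)) := by
        apply List.flatMap_congr
        intro k _
        rw [filt_comb]
        apply (List.map_congr_left ?_).symm
        intro c hc
        exact bracketed_eq_make formula c (mem_nonconsecB _ _ _ _ hc)
    _ = (PySem.List.pyRange 1 (n_brack_pair+1) 1).foldl
        (fun acc k => (nonconsecB 0 n_op k.toNat).foldl
          (fun acc2 idxs => acc2 ++ [bracketedB formula idxs]) acc) [] := by
        simp only [PySem.List.foldl_append_singleton_eq_map]
        rw [List.flatMap_eq_foldl]
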